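-- pv_equiv track=rewrite | github.com/yrgaolan730200/new_lottery | backtest_plus.py | calc_period_reward
-- ===== SOURCE A (Python) =====
-- def calc_period_reward(front_hit_count, target_back_set, payouts):
--     """单个前区组合的66注收益（后区1~12全包）"""
--     if front_hit_count != 3:
--         return 0
--
--     reward = 0
--     for b1 in range(1, 13):
--         for b2 in range(b1 + 1, 13):
--             bh = len({b1, b2}.intersection(target_back_set))
--             if bh == 2:
--                 reward += int(payouts["3+2"])
--             elif bh == 1:
--                 reward += int(payouts["3+1"])
--             else:
--                 reward += int(payouts["3+0"])
--     return reward
-- ===== SOURCE B (Python) =====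
-- def calc_period_reward(front_hit_count, target_back_set, payouts):
--     """单个前区组合的66注收益（后区1~12全包）— closed form over the 66 pairs."""
--     if front_hit_count != 3:
--         return 0
--     k = len(set(range(1, 13)) & set(target_back_set))
--     reward = 0
--     if k >= 2:
--         reward += int(payouts["3+2"]) * (k * (k - 1) // 2)
--     if k * (12 - k) > 0:
--         reward += int(payouts["3+1"]) * (k * (12 - k))
--     if 12 - k >= 2:
--         reward += int(payouts["3+0"]) * ((12 - k) * (11 - k) // 2)
--     return reward
-- ===== Notes on version B (the rewrite author's own statement) =====
-- stated objective: simpler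
-- what changed: B replaces A's double loop over all 66 back-number pairs by a closed form: count k of chosen back numbers in 1..12 and pay C(k,2), k*(12-k) and C(12-k,2) times the three payout categories, reading each payout key only when its pair count is positive (exactly when A reads it).
import Mathlib
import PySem

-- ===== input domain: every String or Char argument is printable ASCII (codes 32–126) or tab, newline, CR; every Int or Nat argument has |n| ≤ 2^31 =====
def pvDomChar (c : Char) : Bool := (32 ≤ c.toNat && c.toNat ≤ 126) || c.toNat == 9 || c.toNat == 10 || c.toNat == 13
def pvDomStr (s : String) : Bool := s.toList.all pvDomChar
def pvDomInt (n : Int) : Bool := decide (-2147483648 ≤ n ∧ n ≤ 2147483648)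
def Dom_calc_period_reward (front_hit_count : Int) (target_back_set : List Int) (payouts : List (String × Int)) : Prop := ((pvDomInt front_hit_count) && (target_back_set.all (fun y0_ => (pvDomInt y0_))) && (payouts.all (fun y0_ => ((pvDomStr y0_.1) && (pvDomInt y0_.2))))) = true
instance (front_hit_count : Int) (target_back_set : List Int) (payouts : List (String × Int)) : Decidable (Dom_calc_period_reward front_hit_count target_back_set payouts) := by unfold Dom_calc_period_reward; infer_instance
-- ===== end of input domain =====

-- B replaces A's 66-iteration double loop by the closed form over the count k of chosen back
-- numbers in 1..12 (C(k,2), k*(12-k), C(12-k,2) pairs per payout category); return values only.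

-- ===== PORT A =====
-- Dict lookup payouts["…"]: a missing key is a Python KeyError, excluded by Pre_, so the
-- total form `.getD 0` is only reached on admitted inputs where the key is present.
def calc_period_reward (front_hit_count : Int) (target_back_set : List Int) (payouts : List (String × Int)) : Int :=
  if front_hit_count ≠ 3 then 0
  else
    (PySem.List.pyRange 1 13 1).foldl (fun reward b1 =>
      (PySem.List.pyRange (b1 + 1) 13 1).foldl (fun reward b2 =>
        let bh := (PySem.Set.inter (PySem.Set.ofList [b1, b2]) target_back_set).length
        if bh = 2 then reward + ((PySem.Dict.mk payouts).get? "3+2").getD 0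
        else if bh = 1 then reward + ((PySem.Dict.mk payouts).get? "3+1").getD 0
        else reward + ((PySem.Dict.mk payouts).get? "3+0").getD 0) reward) 0

-- ===== PORT B =====
def calc_period_reward_alt (front_hit_count : Int) (target_back_set : List Int) (payouts : List (String × Int)) : Int :=
  if front_hit_count ≠ 3 then 0
  else
    let k : Int := (PySem.Set.inter (PySem.Set.ofList (PySem.List.pyRange 1 13 1)) (PySem.Set.ofList target_back_set)).length
    let reward : Int := 0
    let reward := if 2 ≤ k then reward + ((PySem.Dict.mk payouts).get? "3+2").getD 0 * PySem.Int.floordiv (k * (k - 1)) 2 else reward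
    let reward := if 0 < k * (12 - k) then reward + ((PySem.Dict.mk payouts).get? "3+1").getD 0 * (k * (12 - k)) else reward
    let reward := if 2 ≤ 12 - k then reward + ((PySem.Dict.mk payouts).get? "3+0").getD 0 * PySem.Int.floordiv ((12 - k) * (11 - k)) 2 else reward
    reward

-- ===== PRECONDITION & SPEC =====
-- Pre_ excludes exactly the inputs on which the Python A raises KeyError: with k chosen back
-- numbers inside 1..12, A reads payouts["3+2"] iff k ≥ 2, payouts["3+1"] iff 1 ≤ k ≤ 11, and
-- payouts["3+0"] iff k ≤ 10 (and reads nothing when front_hit_count ≠ 3).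
def Pre_calc_period_reward (front_hit_count : Int) (target_back_set : List Int) (payouts : List (String × Int)) : Prop :=
  front_hit_count = 3 →
    (let k := ((PySem.List.pyRange 1 13 1).filter (fun i => decide (i ∈ target_back_set))).length
     (2 ≤ k → "3+2" ∈ payouts.map Prod.fst) ∧
     (1 ≤ k ∧ k ≤ 11 → "3+1" ∈ payouts.map Prod.fst) ∧
     (k ≤ 10 → "3+0" ∈ payouts.map Prod.fst))
instance (front_hit_count : Int) (target_back_set : List Int) (payouts : List (String × Int)) : Decidable (Pre_calc_period_reward front_hit_count target_back_set payouts) := by unfold Pre_calc_period_reward; infer_instance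

def pvWitness_calc_period_reward : Int × List Int × (List (String × Int)) :=
  (3, [1, 2, 20], [("3+2", 100), ("3+1", 10), ("3+0", 2)])

def Spec_calc_period_reward (front_hit_count : Int) (target_back_set : List Int) (payouts : List (String × Int)) (out : Int) : Prop := out = calc_period_reward_alt front_hit_count target_back_set payouts
instance (front_hit_count : Int) (target_back_set : List Int) (payouts : List (String × Int)) (out : Int) : Decidable (Spec_calc_period_reward front_hit_count target_back_set payouts out) := by unfold Spec_calc_period_reward; infer_instance

-- ===== CLAIM (what is proved, stated in full; the proofs are below) =====
def Claim_equal_calc_period_reward : Prop := ∀ (front_hit_count : Int) (target_back_set : List Int) (payouts : List (String × Int)), Dom_calc_period_reward front_hit_count target_back_set payouts → Pre_calc_period_reward front_hit_count target_back_set payouts → Spec_calc_period_reward front_hit_count target_back_set payouts (calc_period_reward front_hit_count target_back_set payouts)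

-- ===== LEMMAS AND PROOFS =====

-- the pair's intersection size with the target set, for distinct b1 b2
lemma pvBh (b1 b2 : Int) (t : List Int) (h : b1 ≠ b2) :
    (PySem.Set.inter (PySem.Set.ofList [b1, b2]) t).length
      = (if b1 ∈ t then 1 else 0) + (if b2 ∈ t then 1 else 0) := by
  simp only [PySem.Set.inter, PySem.Set.contains, List.contains_eq_mem, PySem.Set.ofList,
    PySem.Set.empty_eq, List.foldl_cons, PySem.Set.add, List.not_mem_nil, decide_false,
    Bool.false_eq_true, ↓reduceIte, List.nil_append, List.mem_cons, or_false, decide_eq_true_eq,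
    List.cons_append, List.foldl_nil]
  rw [if_neg (Ne.symm h)]
  simp only [List.filter]
  split_ifs <;> simp_all

lemma pvChoose2_succ (c : Nat) : (((c + 1).choose 2 : Nat) : Int) = c + (c.choose 2 : Int) := by
  have h : (c + 1).choose 2 = c + c.choose 2 := by
    simpa [Nat.choose_one_right] using Nat.choose_succ_succ c 1
  exact_mod_cast congrArg (Nat.cast : Nat → Int) h

lemma pvTwoChoose2 (c : Nat) : (c : Int) * ((c : Int) - 1) = 2 * (c.choose 2 : Int) := by
  induction c with
  | zero => simp
  | succ n ih => rw [pvChoose2_succ]; push_cast; push_cast at ih; nlinarith [ih]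

lemma pvFloordiv2 (c : Nat) :
    PySem.Int.floordiv ((c : Int) * ((c : Int) - 1)) 2 = (c.choose 2 : Int) := by
  rw [pvTwoChoose2, PySem.Int.floordiv_eq_ediv_of_pos (by norm_num)]
  exact Int.mul_ediv_cancel_left _ (by norm_num)

-- inner loop: one row b1 against a list of partners all distinct from b1
lemma pvInner (t : List Int) (p2 p1 p0 : Int) (b1 : Int) (L : List Int) (acc : Int)
    (h : ∀ b2 ∈ L, b1 ≠ b2) :
    L.foldl (fun reward b2 =>
        let bh := (PySem.Set.inter (PySem.Set.ofList [b1, b2]) t).length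
        if bh = 2 then reward + p2 else if bh = 1 then reward + p1 else reward + p0) acc
      = acc + (if b1 ∈ t
          then p2 * (L.countP (fun x => decide (x ∈ t)) : Int) + p1 * (L.countP (fun x => decide (x ∉ t)) : Int)
          else p1 * (L.countP (fun x => decide (x ∈ t)) : Int) + p0 * (L.countP (fun x => decide (x ∉ t)) : Int)) := by
  induction L generalizing acc with
  | nil => simp
  | cons x xs ih =>
    have hx : b1 ≠ x := h x (by simp)
    rw [List.foldl_cons, ih _ (fun b2 hb => h b2 (by simp [hb]))]
    simp only [pvBh b1 x t hx, List.countP_cons]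
    by_cases h1 : b1 ∈ t <;> by_cases h2 : x ∈ t <;>
      simp [h1, h2] <;> ring

-- outer loop, from a = 13 - n up to 12, with the closed form over counts
lemma pvOuter (t : List Int) (p2 p1 p0 : Int) : ∀ (n : Nat) (a : Int), a = 13 - (n : Int) →
    ∀ (acc : Int),
    (PySem.List.pyRange a 13 1).foldl (fun reward b1 =>
      (PySem.List.pyRange (b1 + 1) 13 1).foldl (fun reward b2 =>
        let bh := (PySem.Set.inter (PySem.Set.ofList [b1, b2]) t).length
        if bh = 2 then reward + p2 else if bh = 1 then reward + p1 else reward + p0) reward) acc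
      = acc + p2 * (((PySem.List.pyRange a 13 1).countP (fun x => decide (x ∈ t))).choose 2 : Int)
            + p1 * (((PySem.List.pyRange a 13 1).countP (fun x => decide (x ∈ t)) : Int)
                    * ((PySem.List.pyRange a 13 1).countP (fun x => decide (x ∉ t)) : Int))
            + p0 * (((PySem.List.pyRange a 13 1).countP (fun x => decide (x ∉ t))).choose 2 : Int) := by
  intro n
  induction n with
  | zero =>
    intro a ha acc
    rw [PySem.List.pyRange_one_eq_nil (by rw [ha]; norm_num)]
    simp
  | succ m ih =>
    intro a ha acc
    have ha13 : a < 13 := by rw [ha]; push_cast; omega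
    have hnext : a + 1 = 13 - (m : Int) := by omega
    rw [PySem.List.pyRange_one_cons ha13, List.foldl_cons]
    rw [pvInner t p2 p1 p0 a _ acc
      (fun b2 hb => by have := (PySem.List.mem_pyRange_one.mp hb).1; omega)]
    rw [ih (a + 1) hnext _]
    simp only [List.countP_cons]
    by_cases hm : a ∈ t <;> simp [hm, pvChoose2_succ] <;> ring

-- total length 12 splits into member / non-member counts
lemma pvCountSplit (t : List Int) :
    (PySem.List.pyRange 1 13 1).countP (fun x => decide (x ∈ t))
      + (PySem.List.pyRange 1 13 1).countP (fun x => decide (x ∉ t)) = 12 := by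
  have h := List.length_eq_countP_add_countP (l := PySem.List.pyRange 1 13 1)
    (p := fun x => decide (x ∈ t))
  have hl : (PySem.List.pyRange 1 13 1).length = 12 := by decide
  rw [hl] at h
  rw [h]
  congr 1
  apply List.countP_congr
  intro x _
  simp

-- B's k is the member count
lemma pvK (t : List Int) :
    ((PySem.Set.inter (PySem.Set.ofList (PySem.List.pyRange 1 13 1)) (PySem.Set.ofList t)).length : Int)
      = ((PySem.List.pyRange 1 13 1).countP (fun x => decide (x ∈ t)) : Int) := by
  rw [PySem.Set.ofList_eq_self_of_nodup _ (PySem.List.nodup_pyRange_one 1 13)]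
  simp only [PySem.Set.inter, PySem.Set.contains, List.contains_eq_mem, List.countP_eq_length_filter]
  congr 2
  apply List.filter_congr
  intro x _
  simp [PySem.Set.mem_ofList]

-- ===== VERDICT (by name: the statement is the Claim_ definition above) =====
theorem calc_period_reward_spec : Claim_equal_calc_period_reward := by
  intro fhc t payouts _ _
  unfold Spec_calc_period_reward calc_period_reward calc_period_reward_alt
  by_cases hf : fhc ≠ 3
  · simp [hf]
  · simp only [hf, if_false]
    set c : Nat := (PySem.List.pyRange 1 13 1).countP (fun x => decide (x ∈ t)) with hc
    set d : Nat := (PySem.List.pyRange 1 13 1).countP (fun x => decide (x ∉ t)) with hd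
    have hcd : c + d = 12 := pvCountSplit t
    rw [pvOuter t _ _ _ 12 1 (by norm_num) 0]
    rw [show ((PySem.Set.inter (PySem.Set.ofList (PySem.List.pyRange 1 13 1)) (PySem.Set.ofList t)).length : Int) = (c : Int) from pvK t]
    have h12 : (12 : Int) - (c : Int) = (d : Int) := by omega
    have h11 : (11 : Int) - (c : Int) = (d : Int) - 1 := by omega
    rw [h12, h11, pvFloordiv2 c, pvFloordiv2 d]
    have t2 : (if 2 ≤ (c : Int) then (0 : Int) + ((PySem.Dict.mk payouts).get? "3+2").getD 0 * (c.choose 2 : Int) else 0)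
        = ((PySem.Dict.mk payouts).get? "3+2").getD 0 * (c.choose 2 : Int) := by
      split_ifs with h
      · ring
      · rw [Nat.choose_eq_zero_of_lt (by omega)]; simp
    rw [t2]
    split_ifs with hA hB hB
    · rw [← hc, ← hd]; ring
    · have hdpos : 0 < (d : Int) := by omega
      have hc0 : c = 0 := by
        have h0 : 0 ≤ (c : Int) := by positivity
        have h1 : (c : Int) * d ≤ 0 := not_lt.mp hB
        have : (c : Int) = 0 := by nlinarith
        exact_mod_cast this
      rw [← hc, ← hd, hc0]
      norm_num
    · have hdlt : d < 2 := by omega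
      rw [← hc, ← hd, Nat.choose_eq_zero_of_lt hdlt]
      push_cast; ring
    · have hdlt : d < 2 := by omega
      have hcd0 : (c : Int) * d = 0 := by
        have h0 : 0 ≤ (c : Int) * d := by positivity
        have h1 : (c : Int) * d ≤ 0 := not_lt.mp hB
        omega
      rw [← hc, ← hd, Nat.choose_eq_zero_of_lt hdlt, hcd0]
      push_cast; ring
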